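-- pv_equiv track=rewrite | github.com/TrungHuu020105/CK_KTDVVDTDM | simulation/kafka_to_databricks_sink.py | _latest_per_device
-- ===== SOURCE A (Python) =====
-- from typing import Dict, List, Optional
--
-- def _latest_per_device(rows: List[Dict]) -> List[Dict]:
--     latest = {}
--     for row in rows:
--         device_id = row["device_id"]
--         old = latest.get(device_id)
--         if old is None or row["timestamp"] >= old["timestamp"]:
--             latest[device_id] = row
--     return list(latest.values())
-- ===== SOURCE B (Python) =====
-- def _latest_per_device(rows):
--     groups = {}
--     for row in rows:
--         device_id = row["device_id"]
--         if device_id in groups: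
--             groups[device_id].append(row)
--         else:
--             groups[device_id] = [row]
--     result = []
--     for group in groups.values():
--         best = group[0]
--         for r in group[1:]:
--             if r["timestamp"] >= best["timestamp"]:
--                 best = r
--         result.append(best)
--     return result
-- ===== Notes on version B (the rewrite author's own statement) =====
-- stated objective: alternative
-- what changed: A keeps a running best-so-far row per device in one dict pass; B first groups all rows by device_id (preserving first-appearance order) and then, per group, scans for the last row with maximal timestamp.
import Mathlib
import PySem

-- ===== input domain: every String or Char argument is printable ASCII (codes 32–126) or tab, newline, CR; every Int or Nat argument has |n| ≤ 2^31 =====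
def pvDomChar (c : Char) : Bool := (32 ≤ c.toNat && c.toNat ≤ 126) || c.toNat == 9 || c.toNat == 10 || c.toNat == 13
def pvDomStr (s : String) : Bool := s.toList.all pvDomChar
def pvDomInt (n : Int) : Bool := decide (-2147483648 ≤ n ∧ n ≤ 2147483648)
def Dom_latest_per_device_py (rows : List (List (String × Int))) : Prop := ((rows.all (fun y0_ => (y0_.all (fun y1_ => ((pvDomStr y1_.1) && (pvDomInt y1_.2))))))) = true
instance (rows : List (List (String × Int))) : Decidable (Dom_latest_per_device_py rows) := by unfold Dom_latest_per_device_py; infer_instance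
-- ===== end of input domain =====

-- B groups rows by device_id and then selects the last max-timestamp row of each group,
-- instead of A's single-pass running-best dict; same cost, different decomposition.

-- row["k"]: first-match lookup in the association list (rows are Python dicts);
-- the 0 default is unreachable under Pre_ (Python raises KeyError there)
def pvRowGet (r : List (String × Int)) (k : String) : Int := (List.lookup k r).getD 0

-- ===== PORT A =====
def pvAStep (latest : PySem.Dict Int (List (String × Int))) (row : List (String × Int)) :
    PySem.Dict Int (List (String × Int)) :=
  let device_id := pvRowGet row "device_id"
  match latest.get? device_id with
  | none => latest.insert device_id row
  | some old =>
      if pvRowGet row "timestamp" ≥ pvRowGet old "timestamp" then latest.insert device_id row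
      else latest

def latest_per_device_py (rows : List (List (String × Int))) : List (List (String × Int)) :=
  (rows.foldl pvAStep PySem.Dict.empty).values

-- ===== PORT B =====
def pvTs (r : List (String × Int)) : Int := pvRowGet r "timestamp"

-- best = group[0]; for r in group[1:]: keep r on r["timestamp"] >= best["timestamp"];
-- the [] arm is unreachable: every group built by the loop is nonempty (Python group[0] would raise)
def pvPickLatest (group : List (List (String × Int))) : List (String × Int) :=
  match group with
  | [] => []
  | b :: t => t.foldl (fun best r => if pvTs r ≥ pvTs best then r else best) b

def pvBStep (groups : PySem.Dict Int (List (List (String × Int)))) (row : List (String × Int)) :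
    PySem.Dict Int (List (List (String × Int))) :=
  let device_id := pvRowGet row "device_id"
  if groups.contains device_id then groups.insert device_id (groups.getD device_id [] ++ [row])
  else groups.insert device_id [row]

-- the result loop appends pvPickLatest of each group, i.e. maps it over the values
def latest_per_device_py_alt (rows : List (List (String × Int))) : List (List (String × Int)) :=
  ((rows.foldl pvBStep PySem.Dict.empty).values).map pvPickLatest

-- ===== PRECONDITION & SPEC =====
-- Pre_ excludes exactly the inputs where both A and B raise KeyError: a row without a
-- "device_id" key, or a row without a "timestamp" key whose device_id occurs in ≥ 2 rows
-- (only then is a timestamp ever compared).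
def Pre_latest_per_device_py (rows : List (List (String × Int))) : Prop :=
  ∀ row ∈ rows, (List.lookup "device_id" row).isSome = true ∧
    (2 ≤ rows.countP (fun r' => List.lookup "device_id" r' == List.lookup "device_id" row) →
      (List.lookup "timestamp" row).isSome = true)
instance (rows : List (List (String × Int))) : Decidable (Pre_latest_per_device_py rows) := by
  unfold Pre_latest_per_device_py; infer_instance

def pvWitness_latest_per_device_py : (List (List (String × Int))) :=
  [[("device_id", 1), ("timestamp", 5)], [("device_id", 1), ("timestamp", 7)], [("device_id", 2), ("timestamp", 3)]]

def Spec_latest_per_device_py (rows : List (List (String × Int))) (out : List (List (String × Int))) : Prop := out = latest_per_device_py_alt rows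
instance (rows : List (List (String × Int))) (out : List (List (String × Int))) : Decidable (Spec_latest_per_device_py rows out) := by unfold Spec_latest_per_device_py; infer_instance

-- ===== CLAIM (what is proved, stated in full; the proofs are below) =====
def Claim_equal_latest_per_device_py : Prop := ∀ (rows : List (List (String × Int))), Dom_latest_per_device_py rows → Pre_latest_per_device_py rows → Spec_latest_per_device_py rows (latest_per_device_py rows)

-- ===== LEMMAS AND PROOFS =====

-- items of A's dict are the items of B's group dict with each group replaced by its pick
def pvF (p : Int × List (List (String × Int))) : Int × List (String × Int) :=
  (p.1, pvPickLatest p.2)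

theorem pvPick_append (g : List (List (String × Int))) (r : List (String × Int)) (hg : g ≠ []) :
    pvPickLatest (g ++ [r]) = if pvTs r ≥ pvTs (pvPickLatest g) then r else pvPickLatest g := by
  cases g with
  | nil => exact absurd rfl hg
  | cons b t => simp [pvPickLatest, List.foldl_append]

def pvInv (dA : PySem.Dict Int (List (String × Int)))
    (gB : PySem.Dict Int (List (List (String × Int)))) : Prop :=
  dA.items = gB.items.map pvF ∧ (∀ p ∈ gB.items, p.2 ≠ []) ∧ gB.keys.Nodup

theorem pvGet_rel (dA : PySem.Dict Int (List (String × Int)))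
    (gB : PySem.Dict Int (List (List (String × Int))))
    (hrel : dA.items = gB.items.map pvF) (k : Int) :
    dA.get? k = (gB.get? k).map pvPickLatest := by
  simp only [PySem.Dict.get?, hrel, List.find?_map, Option.map_map]
  rfl

theorem pvInv_step (dA : PySem.Dict Int (List (String × Int)))
    (gB : PySem.Dict Int (List (List (String × Int))))
    (row : List (String × Int)) (h : pvInv dA gB) :
    pvInv (pvAStep dA row) (pvBStep gB row) := by
  obtain ⟨hrel, hne, hnd⟩ := h
  set d := pvRowGet row "device_id" with hd
  have hget := pvGet_rel dA gB hrel d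
  by_cases hc : gB.contains d = true
  · -- the device already has a group
    have hsome : (gB.get? d).isSome := by
      rw [← PySem.Dict.contains_eq_isSome_get?]; exact hc
    obtain ⟨g, hg⟩ : ∃ g, gB.get? d = some g := by
      cases hG : gB.get? d with
      | none => rw [hG] at hsome; simp at hsome
      | some g => exact ⟨g, rfl⟩
    have hgmem : (d, g) ∈ gB.items := PySem.Dict.mem_items_of_get?_eq_some gB hg
    have hgne : g ≠ [] := hne _ hgmem
    have hAget : dA.get? d = some (pvPickLatest g) := by rw [hget, hg]; rfl
    have hAc : dA.contains d = true := by
      rw [PySem.Dict.contains_eq_isSome_get?, hAget]; rfl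
    have hBstep : pvBStep gB row = gB.insert d (g ++ [row]) := by
      simp only [pvBStep, ← hd, hc, if_true, PySem.Dict.getD_of_get?_eq_some gB [] hg]
    have hnd' : (gB.insert d (g ++ [row])).keys.Nodup := PySem.Dict.nodup_keys_insert _ _ _ hnd
    have hBitems : (gB.insert d (g ++ [row])).items
        = gB.items.map (fun p => if p.1 == d then (d, g ++ [row]) else p) :=
      PySem.Dict.items_insert_of_contains gB _ hc
    by_cases hts : pvTs row ≥ pvTs (pvPickLatest g)
    · -- A replaces the stored row
      have hAstep : pvAStep dA row = dA.insert d row := by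
        simp only [pvAStep, ← hd, hAget]
        split_ifs with h
        · rfl
        · exact absurd hts h
      rw [hAstep, hBstep]
      refine ⟨?_, ?_, hnd'⟩
      · rw [PySem.Dict.items_insert_of_contains dA _ hAc, hBitems, hrel,
          List.map_map, List.map_map]
        apply List.map_congr_left
        intro p _
        by_cases hp : p.1 == d
        · have hp' : (pvF p).1 == d := hp
          simp only [Function.comp, hp, pvF,
            pvPick_append g row hgne, hts, if_true]
        · have hp' : ((pvF p).1 == d) = false := by
            simp only [pvF]; exact Bool.eq_false_iff.mpr (by simp_all)
          simp [Function.comp, hp, hp']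
      · intro p hp
        rw [hBitems] at hp
        obtain ⟨q, hq, hpq⟩ := List.mem_map.mp hp
        by_cases hqd : q.1 == d
        · simp only [hqd, if_true] at hpq; subst hpq; simp
        · simp only [hqd, Bool.false_eq_true, if_false] at hpq; subst hpq; exact hne _ hq
    · -- A keeps the stored row
      have hAstep : pvAStep dA row = dA := by
        simp only [pvAStep, ← hd, hAget]
        split_ifs with h
        · exact absurd h hts
        · rfl
      rw [hAstep, hBstep]
      refine ⟨?_, ?_, hnd'⟩
      · rw [hBitems, hrel, List.map_map]
        apply List.map_congr_left
        intro p hp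
        by_cases hpd : p.1 == d
        · have hp1 : p.1 = d := by exact_mod_cast (beq_iff_eq.mp hpd)
          have hglook : gB.get? d = some p.2 := by
            have : (d, p.2) ∈ gB.items := by rw [← hp1]; exact hp
            exact PySem.Dict.get?_of_mem_items gB this hnd
          have hp2 : p.2 = g := by
            rw [hglook] at hg; exact Option.some.inj hg
          simp only [Function.comp, pvF, hp1, hp2]
          simp [pvPick_append g row hgne, hts]
        · simp [Function.comp, hpd]
      · intro p hp
        rw [hBitems] at hp
        obtain ⟨q, hq, hpq⟩ := List.mem_map.mp hp
        by_cases hqd : q.1 == d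
        · simp only [hqd, if_true] at hpq; subst hpq; simp
        · simp only [hqd, Bool.false_eq_true, if_false] at hpq; subst hpq; exact hne _ hq
  · -- a new device: both dicts append
    have hc' : gB.contains d = false := by simpa using hc
    have hgnone : gB.get? d = none := by
      cases hG : gB.get? d with
      | none => rfl
      | some g =>
          have : gB.contains d = true := by
            rw [PySem.Dict.contains_eq_isSome_get?, hG]; rfl
          rw [this] at hc'; cases hc'
    have hAget : dA.get? d = none := by rw [hget, hgnone]; rfl
    have hAc : dA.contains d = false := by
      rw [PySem.Dict.contains_eq_isSome_get?, hAget]; rfl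
    have hAstep : pvAStep dA row = dA.insert d row := by
      simp [pvAStep, ← hd, hAget]
    have hBstep : pvBStep gB row = gB.insert d [row] := by
      simp [pvBStep, ← hd, hc']
    rw [hAstep, hBstep]
    refine ⟨?_, ?_, PySem.Dict.nodup_keys_insert _ _ _ hnd⟩
    · rw [PySem.Dict.items_insert_of_not_contains dA _ hAc,
        PySem.Dict.items_insert_of_not_contains gB _ hc', hrel, List.map_append]
      rfl
    · intro p hp
      rw [PySem.Dict.items_insert_of_not_contains gB _ hc'] at hp
      rcases List.mem_append.mp hp with h1 | h1
      · exact hne _ h1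
      · simp only [List.mem_singleton] at h1; subst h1; simp

theorem pvInv_foldl (rows : List (List (String × Int))) :
    ∀ dA gB, pvInv dA gB → pvInv (rows.foldl pvAStep dA) (rows.foldl pvBStep gB) := by
  induction rows with
  | nil => intro dA gB h; exact h
  | cons r t ih =>
      intro dA gB h
      exact ih _ _ (pvInv_step dA gB r h)

-- ===== VERDICT (by name: the statement is the Claim_ definition above) =====
theorem latest_per_device_py_spec : Claim_equal_latest_per_device_py := by
  intro rows _ _
  unfold Spec_latest_per_device_py latest_per_device_py latest_per_device_py_alt
  have h0 : pvInv PySem.Dict.empty PySem.Dict.empty := by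
    refine ⟨rfl, ?_, ?_⟩ <;> simp [PySem.Dict.empty, PySem.Dict.keys]
  obtain ⟨hrel, -, -⟩ := pvInv_foldl rows _ _ h0
  simp only [PySem.Dict.values, hrel, List.map_map]
  rfl
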